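-- pv_equiv track=rewrite | github.com/wjdmxx/DUSA_TTA_Lightning_Seg_new | src/utils/device_utils.py | create_balanced_device_map
-- ===== SOURCE A (Python) =====
-- from typing import Dict, Optional, Union, Any, List
--
-- def create_balanced_device_map(
--     num_layers: int,
--     num_gpus: int,
--     prefix: str = "transformer_blocks",
--     input_layers: Optional[List[str]] = None,
--     output_layers: Optional[List[str]] = None,
-- ) -> Dict[str, str]:
--     """
--     Create a balanced device map for transformer models.
--
--     Args:
--         num_layers: Number of transformer blocks
--         num_gpus: Number of GPUs to use
--         prefix: Prefix for layer names
--         input_layers: Layer names to place on first GPU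
--         output_layers: Layer names to place on last GPU
--
--     Returns:
--         Device map dict
--     """
--     device_map = {}
--
--     # Input layers on first GPU
--     if input_layers:
--         for layer in input_layers:
--             device_map[layer] = "cuda:0"
--
--     # Distribute transformer blocks evenly
--     layers_per_gpu = num_layers // num_gpus
--     remainder = num_layers % num_gpus
--
--     current_layer = 0
--     for gpu_idx in range(num_gpus):
--         # Add extra layer to early GPUs if there's a remainder
--         n_layers = layers_per_gpu + (1 if gpu_idx < remainder else 0)
--         for _ in range(n_layers):
--             device_map[f"{prefix}.{current_layer}"] = f"cuda:{gpu_idx}"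
--             current_layer += 1
--
--     # Output layers on last GPU
--     if output_layers:
--         for layer in output_layers:
--             device_map[layer] = f"cuda:{num_gpus - 1}"
--
--     return device_map
-- ===== SOURCE B (Python) =====
-- def create_balanced_device_map(
--     num_layers,
--     num_gpus,
--     prefix="transformer_blocks",
--     input_layers=None,
--     output_layers=None,
-- ):
--     # Staged decomposition: build a flat list of (name, device) entries via three
--     # comprehensions (the GPU of each block computed in closed form from
--     # divmod(num_layers, num_gpus)), then load them into the dict in one pass.
--     layers_per_gpu, remainder = divmod(num_layers, num_gpus)
--     boundary = remainder * (layers_per_gpu + 1)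
--
--     def gpu_of(i):
--         if i < boundary:
--             return i // (layers_per_gpu + 1)
--         return remainder + (i - boundary) // layers_per_gpu
--
--     entries = (
--         [(layer, "cuda:0") for layer in (input_layers or [])]
--         + [(f"{prefix}.{i}", f"cuda:{gpu_of(i)}") for i in range(num_layers)]
--         + [(layer, f"cuda:{num_gpus - 1}") for layer in (output_layers or [])]
--     )
--     device_map = {}
--     for name, device in entries:
--         device_map[name] = device
--     return device_map
-- ===== Notes on version B (the rewrite author's own statement) =====
-- stated objective: alternative
-- what changed: Replaces A's nested per-GPU loops with a mutable running layer counter by a staged pipeline: build a flat list of (name, device) entries with each block's GPU computed in closed form from divmod(num_layers, num_gpus), then insert all entries into the dict in one pass.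
-- outside the precondition, e.g. on create_balanced_device_map(1, -2, 't', None, None): A returns {}, B returns {'t.0': 'cuda:-1'}
import Mathlib
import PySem

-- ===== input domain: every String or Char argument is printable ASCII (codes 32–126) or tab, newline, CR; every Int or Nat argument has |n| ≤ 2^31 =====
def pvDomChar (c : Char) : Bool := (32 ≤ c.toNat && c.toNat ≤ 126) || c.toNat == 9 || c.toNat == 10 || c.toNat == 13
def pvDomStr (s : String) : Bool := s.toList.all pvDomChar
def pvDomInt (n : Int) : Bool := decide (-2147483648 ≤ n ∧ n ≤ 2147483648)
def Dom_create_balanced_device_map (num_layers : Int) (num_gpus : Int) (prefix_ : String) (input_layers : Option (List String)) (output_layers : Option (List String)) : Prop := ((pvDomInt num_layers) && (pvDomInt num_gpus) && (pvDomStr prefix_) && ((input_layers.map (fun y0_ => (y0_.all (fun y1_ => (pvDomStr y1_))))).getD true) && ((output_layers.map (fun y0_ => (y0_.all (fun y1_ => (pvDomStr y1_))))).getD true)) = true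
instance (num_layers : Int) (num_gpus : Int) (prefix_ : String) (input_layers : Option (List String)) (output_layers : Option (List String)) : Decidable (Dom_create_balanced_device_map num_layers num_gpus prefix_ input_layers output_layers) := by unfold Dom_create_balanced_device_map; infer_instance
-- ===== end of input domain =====

-- ===== PORT A =====
-- B replaces A's nested per-GPU loops + running counter by a staged pipeline: build the
-- flat (name, device) entry list with a closed-form GPU index, then one insertion pass
-- (objective: alternative decomposition; return value only).
-- Shared f-string helpers: f"{prefix}.{i}" and f"cuda:{g}".
def pvKey (prefix_ : String) (i : Int) : String := prefix_ ++ "." ++ PySem.Int.toStr i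

def pvVal (g : Int) : String := "cuda:" ++ PySem.Int.toStr g

def create_balanced_device_map (num_layers : Int) (num_gpus : Int) (prefix_ : String) (input_layers : Option (List String)) (output_layers : Option (List String)) : List (String × String) :=
  let dm0 : PySem.Dict String String := PySem.Dict.empty
  let dm1 := match input_layers with
    | some ls => ls.foldl (fun (d : PySem.Dict String String) layer => d.insert layer "cuda:0") dm0
    | none => dm0
  let layers_per_gpu := PySem.Int.floordiv num_layers num_gpus
  let remainder := PySem.Int.mod num_layers num_gpus
  let st := (PySem.List.pyRange 0 num_gpus 1).foldl
    (fun (st : PySem.Dict String String × Int) gpu_idx =>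
      (PySem.List.pyRange 0 (layers_per_gpu + (if gpu_idx < remainder then (1 : Int) else 0)) 1).foldl
        (fun (st2 : PySem.Dict String String × Int) _ =>
          (st2.1.insert (pvKey prefix_ st2.2) (pvVal gpu_idx), st2.2 + 1)) st)
    (dm1, 0)
  let dm2 := st.1
  let dm3 := match output_layers with
    | some ls => ls.foldl (fun (d : PySem.Dict String String) layer => d.insert layer (pvVal (num_gpus - 1))) dm2
    | none => dm2
  dm3.items

-- ===== PORT B =====
def create_balanced_device_map_alt (num_layers : Int) (num_gpus : Int) (prefix_ : String) (input_layers : Option (List String)) (output_layers : Option (List String)) : List (String × String) :=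
  let layers_per_gpu := PySem.Int.floordiv num_layers num_gpus
  let remainder := PySem.Int.mod num_layers num_gpus
  let boundary := remainder * (layers_per_gpu + 1)
  let gpu_of : Int → Int := fun i =>
    if i < boundary then PySem.Int.floordiv i (layers_per_gpu + 1)
    else remainder + PySem.Int.floordiv (i - boundary) layers_per_gpu
  let entries : List (String × String) :=
    ((input_layers.getD []).map (fun layer => (layer, "cuda:0")))
    ++ ((PySem.List.pyRange 0 num_layers 1).map (fun i => (pvKey prefix_ i, pvVal (gpu_of i))))
    ++ ((output_layers.getD []).map (fun layer => (layer, pvVal (num_gpus - 1))))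
  (entries.foldl (fun (d : PySem.Dict String String) kv => d.insert kv.1 kv.2) PySem.Dict.empty).items

-- ===== PRECONDITION & SPEC =====
-- Pre_ excludes num_gpus <= 0, outside the function's natural domain (a GPU count is
-- positive): at num_gpus = 0 A raises ZeroDivisionError, and for negative num_gpus A's
-- GPU loop is empty so its value is an accident of the loop bounds that B does not match.
def Pre_create_balanced_device_map (num_layers : Int) (num_gpus : Int) (prefix_ : String) (input_layers : Option (List String)) (output_layers : Option (List String)) : Prop := 1 ≤ num_gpus
instance (num_layers : Int) (num_gpus : Int) (prefix_ : String) (input_layers : Option (List String)) (output_layers : Option (List String)) : Decidable (Pre_create_balanced_device_map num_layers num_gpus prefix_ input_layers output_layers) := by unfold Pre_create_balanced_device_map; infer_instance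

def pvWitness_create_balanced_device_map : Int × Int × String × Option (List String) × Option (List String) := (7, 3, "transformer_blocks", some ["emb"], some ["head"])

def Spec_create_balanced_device_map (num_layers : Int) (num_gpus : Int) (prefix_ : String) (input_layers : Option (List String)) (output_layers : Option (List String)) (out : List (String × String)) : Prop := out = create_balanced_device_map_alt num_layers num_gpus prefix_ input_layers output_layers
instance (num_layers : Int) (num_gpus : Int) (prefix_ : String) (input_layers : Option (List String)) (output_layers : Option (List String)) (out : List (String × String)) : Decidable (Spec_create_balanced_device_map num_layers num_gpus prefix_ input_layers output_layers out) := by unfold Spec_create_balanced_device_map; infer_instance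

-- ===== CLAIM (what is proved, stated in full; the proofs are below) =====
def Claim_equal_create_balanced_device_map : Prop := ∀ (num_layers : Int) (num_gpus : Int) (prefix_ : String) (input_layers : Option (List String)) (output_layers : Option (List String)), Dom_create_balanced_device_map num_layers num_gpus prefix_ input_layers output_layers → Pre_create_balanced_device_map num_layers num_gpus prefix_ input_layers output_layers → Spec_create_balanced_device_map num_layers num_gpus prefix_ input_layers output_layers (create_balanced_device_map num_layers num_gpus prefix_ input_layers output_layers)

-- ===== LEMMAS AND PROOFS =====

-- A's inner loop (counter-driven repeated insert of the same value) written as a fold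
-- over the explicit index range it traverses.
lemma pv_inner (key : Int → String) (val : String) :
    ∀ (l : List Int) (c : Int) (d : PySem.Dict String String),
    l.foldl (fun (st2 : PySem.Dict String String × Int) _ =>
        (st2.1.insert (key st2.2) val, st2.2 + 1)) (d, c)
    = ((PySem.List.pyRange c (c + l.length) 1).foldl
        (fun (d : PySem.Dict String String) i => d.insert (key i) val) d, c + l.length) := by
  intro l
  induction l with
  | nil =>
    intro c d
    simp [PySem.List.pyRange_one_eq_nil (le_refl c)]
  | cons x t ih =>
    intro c d
    simp only [List.foldl_cons, List.length_cons]
    rw [ih (c + 1)]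
    have hlen : c + ((t.length + 1 : Nat) : Int) = (c + 1) + (t.length : Int) := by
      push_cast; ring
    rw [hlen, PySem.List.pyRange_one_cons (by omega : c < (c + 1) + (t.length : Int)),
        List.foldl_cons]

-- a fold whose body fixes every state is the identity
lemma pv_fold_id {α β : Type} (f : α → β → α) :
    ∀ (l : List β), (∀ x ∈ l, ∀ st, f st x = st) → ∀ st, l.foldl f st = st := by
  intro l
  induction l with
  | nil => intro _ st; rfl
  | cons x t ih =>
    intro h st
    rw [List.foldl_cons, h x (List.mem_cons_self), ih (fun y hy => h y (List.mem_cons_of_mem _ hy))]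

-- Main loop correspondence: processing the remaining GPUs g..G-1 of A's nested loop,
-- starting from the counter value g*lpg + min g rem, equals B's flat pass over the layer
-- indices still to be assigned, with the closed-form GPU index.
lemma pv_outer (prefix_ : String) (L G lpg rem : Int)
    (hlpg : 0 ≤ lpg) (hrem : 0 ≤ rem) (hremG : rem < G)
    (hLG : lpg * G + rem = L) :
    ∀ (k : Nat), ∀ (g : Int), 0 ≤ g → g + (k : Int) = G → ∀ (d : PySem.Dict String String),
    (PySem.List.pyRange g G 1).foldl
      (fun (st : PySem.Dict String String × Int) gpu_idx =>
        (PySem.List.pyRange 0 (lpg + (if gpu_idx < rem then (1 : Int) else 0)) 1).foldl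
          (fun (st2 : PySem.Dict String String × Int) _ =>
            (st2.1.insert (pvKey prefix_ st2.2) (pvVal gpu_idx), st2.2 + 1)) st)
      (d, g * lpg + min g rem)
    = ((PySem.List.pyRange (g * lpg + min g rem) L 1).foldl
        (fun (d : PySem.Dict String String) i => d.insert (pvKey prefix_ i)
          (pvVal (if i < rem * (lpg + 1) then PySem.Int.floordiv i (lpg + 1)
                  else rem + PySem.Int.floordiv (i - rem * (lpg + 1)) lpg))) d, L) := by
  intro k
  induction k with
  | zero =>
    intro g hg0 hgG d
    have hgG' : g = G := by omega
    subst hgG'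
    have hmin : min g rem = rem := by omega
    have hstart : g * lpg + min g rem = L := by
      rw [hmin, mul_comm]; exact hLG
    rw [hstart, PySem.List.pyRange_one_eq_nil (le_refl g),
        PySem.List.pyRange_one_eq_nil (le_refl L)]
    rfl
  | succ k ih =>
    intro g hg0 hgG d
    have hgG' : g < G := by omega
    rw [PySem.List.pyRange_one_cons hgG', List.foldl_cons]
    -- the inner loop of GPU g
    have hn : (0 : Int) ≤ lpg + (if g < rem then (1 : Int) else 0) := by
      split_ifs <;> omega
    have hlen : (((PySem.List.pyRange 0 (lpg + (if g < rem then (1 : Int) else 0)) 1).length : Nat) : Int)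
        = lpg + (if g < rem then (1 : Int) else 0) := by
      rw [PySem.List.length_pyRange_one]
      omega
    rw [pv_inner, hlen]
    -- the counter after GPU g is the start value for GPU g+1
    have hmul : (g + 1) * lpg = g * lpg + lpg := by ring
    have hstep : g * lpg + min g rem + (lpg + (if g < rem then (1 : Int) else 0))
        = (g + 1) * lpg + min (g + 1) rem := by
      rw [hmul]; split_ifs with h <;> omega
    rw [hstep, ih (g + 1) (by omega) (by omega)]
    -- split B's flat range at the same point
    have hGg : 0 ≤ (G - (g + 1)) * lpg := mul_nonneg (by omega) hlpg
    have hGg' : (G - (g + 1)) * lpg = G * lpg - (g + 1) * lpg := by ring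
    have hcomm : lpg * G = G * lpg := mul_comm _ _
    have h1 : g * lpg + min g rem ≤ (g + 1) * lpg + min (g + 1) rem := by
      rw [hmul]; omega
    have h2 : (g + 1) * lpg + min (g + 1) rem ≤ L := by omega
    rw [PySem.List.pyRange_one_append _ _ _ h1 h2, List.foldl_append]
    -- on this segment B's closed-form GPU index is g
    have hseg : ∀ (d' : PySem.Dict String String) (i : Int),
        i ∈ PySem.List.pyRange (g * lpg + min g rem) ((g + 1) * lpg + min (g + 1) rem) 1 →
        d'.insert (pvKey prefix_ i)
          (pvVal (if i < rem * (lpg + 1) then PySem.Int.floordiv i (lpg + 1)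
                  else rem + PySem.Int.floordiv (i - rem * (lpg + 1)) lpg))
        = d'.insert (pvKey prefix_ i) (pvVal g) := by
      intro d' i hi
      rw [PySem.List.mem_pyRange_one] at hi
      have hb : rem * (lpg + 1) = rem * lpg + rem := by ring
      by_cases hgrem : g < rem
      · -- fat region: i < boundary and i // (lpg+1) = g
        have hmin1 : min g rem = g := by omega
        have hmin2 : min (g + 1) rem = g + 1 := by omega
        have hlow : g * (lpg + 1) ≤ i := by
          have : g * (lpg + 1) = g * lpg + g := by ring
          rw [this]; omega
        have hhigh : i < (g + 1) * (lpg + 1) := by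
          have : (g + 1) * (lpg + 1) = (g + 1) * lpg + (g + 1) := by ring
          rw [this]; omega
        have hbd : (g + 1) * (lpg + 1) ≤ rem * (lpg + 1) :=
          mul_le_mul_of_nonneg_right (by omega) (by omega)
        have hif : i < rem * (lpg + 1) := by omega
        rw [if_pos hif,
            (PySem.Int.floordiv_eq_iff_of_pos (by omega : (0 : Int) < lpg + 1)).mpr
              ⟨hlow, hhigh⟩]
      · -- thin region: i ≥ boundary and rem + (i - boundary) // lpg = g
        have hmin1 : min g rem = rem := by omega
        have hmin2 : min (g + 1) rem = rem := by omega
        rw [hmin1, hmul, hmin2] at hi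
        have hlpg1 : 1 ≤ lpg := by omega
        have hgr : rem * lpg ≤ g * lpg := mul_le_mul_of_nonneg_right (by omega) hlpg
        have hif : ¬ i < rem * (lpg + 1) := by omega
        have hq1 : (g - rem) * lpg ≤ i - rem * (lpg + 1) := by
          have : (g - rem) * lpg = g * lpg - rem * lpg := by ring
          omega
        have hq2 : i - rem * (lpg + 1) < (g - rem + 1) * lpg := by
          have : (g - rem + 1) * lpg = g * lpg - rem * lpg + lpg := by ring
          omega
        rw [if_neg hif,
            (PySem.Int.floordiv_eq_iff_of_pos (by omega : (0 : Int) < lpg)).mpr ⟨hq1, hq2⟩]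
        congr 1
        congr 1
        omega
    rw [PySem.List.foldl_congr_mem _ _ _ _ (fun d' i hi => hseg d' i hi)]

-- ===== VERDICT (by name: the statement is the Claim_ definition above) =====
theorem create_balanced_device_map_spec : Claim_equal_create_balanced_device_map := by
  intro L G prefix_ il ol _hDom hPre
  unfold Spec_create_balanced_device_map
  unfold create_balanced_device_map create_balanced_device_map_alt
  have hG : (1 : Int) ≤ G := hPre
  set lpg := PySem.Int.floordiv L G with hlpgdef
  set rem := PySem.Int.mod L G with hremdef
  have hrem : 0 ≤ rem := PySem.Int.mod_nonneg L (by omega)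
  have hremG : rem < G := PySem.Int.mod_lt L (by omega)
  have hLG : lpg * G + rem = L := PySem.Int.floordiv_mul_add_mod L G
  -- it suffices to identify the middle (transformer-blocks) loops
  have hmid : ∀ (d : PySem.Dict String String),
      ((PySem.List.pyRange 0 G 1).foldl
        (fun (st : PySem.Dict String String × Int) gpu_idx =>
          (PySem.List.pyRange 0 (lpg + (if gpu_idx < rem then (1 : Int) else 0)) 1).foldl
            (fun (st2 : PySem.Dict String String × Int) _ =>
              (st2.1.insert (pvKey prefix_ st2.2) (pvVal gpu_idx), st2.2 + 1)) st)
        (d, 0)).1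
      = (PySem.List.pyRange 0 L 1).foldl
          (fun (d : PySem.Dict String String) i => d.insert (pvKey prefix_ i)
            (pvVal (if i < rem * (lpg + 1) then PySem.Int.floordiv i (lpg + 1)
                    else rem + PySem.Int.floordiv (i - rem * (lpg + 1)) lpg))) d := by
    intro d
    by_cases hL : 1 ≤ L
    · have hlpg : 0 ≤ lpg := by
        rw [hlpgdef, PySem.Int.floordiv_eq_ediv_of_pos (by omega : (0:Int) < G)]
        exact Int.ediv_nonneg (by omega) (by omega)
      have h0 : (0 : Int) * lpg + min 0 rem = 0 := by omega
      have := pv_outer prefix_ L G lpg rem hlpg hrem hremG hLG G.toNat 0 (le_refl 0)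
        (by omega) d
      rw [h0] at this
      rw [this]
    · -- num_layers ≤ 0: both middle loops do nothing
      have hlpgle : lpg * G ≤ 0 := by omega
      rw [PySem.List.pyRange_one_eq_nil (by omega : L ≤ 0)]
      rw [pv_fold_id _ _ ?hfix (d, 0)]
      case hfix =>
        intro x hx st
        rw [PySem.List.mem_pyRange_one] at hx
        have hn : lpg + (if x < rem then (1 : Int) else 0) ≤ 0 := by
          have hlpg0 : lpg ≤ 0 := by
            by_contra h
            have : 1 * G ≤ lpg * G := mul_le_mul_of_nonneg_right (by omega) (by omega)
            omega
          split_ifs with h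
          · have hr1 : 1 ≤ rem := by omega
            have : lpg * G ≤ -1 := by omega
            have hneg : lpg ≤ -1 := by
              by_contra hc
              have h0' : lpg = 0 := by omega
              rw [h0'] at this; omega
            omega
          · omega
        rw [PySem.List.pyRange_one_eq_nil hn]
        rfl
      rfl
  -- B's single pass over the appended entry lists splits into the three stage folds
  simp only [List.foldl_append, List.foldl_map]
  cases il with
  | none =>
    cases ol with
    | none => simp only [Option.getD, List.foldl_nil]; rw [hmid]
    | some ls => simp only [Option.getD, List.foldl_nil]; rw [hmid]
  | some ls =>
    cases ol with
    | none => simp only [Option.getD, List.foldl_nil]; rw [hmid]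
    | some ls' => simp only [Option.getD, List.foldl_nil]; rw [hmid]
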